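-- pv_equiv track=rewrite | github.com/oomol-lab/pdf-craft | pdf_craft/pdf/ngrams.py | has_repetitive_ngrams
-- ===== SOURCE A (Python) =====
-- def has_repetitive_ngrams(
--     text: str,
--     min_ngram: int,
--     max_ngram: int,
--     repeat_threshold: int,
-- ) -> bool:
--     """
--     检测文本中是否存在大量重复的 n-gram 模式（字符级别）。
--
--     这个方法用于检测 OCR 模型的 "Neural Text Degeneration" 问题。
--     当 Transformer 模型训练不足或解码参数配置不当时，会生成重复的文本片段，
--     例如 "这是一个例子这是一个例子这是一个例子..." 或
--          "this is a test this is a test this is a test..."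
--     这种重复模式是无意义的噪声，需要被识别和过滤。
--
--     采用字符级别分词以支持中文等没有空格分隔的语言。
--     """
--     if not text:
--         return False
--
--     chars = list(text)
--     if len(chars) < min_ngram * repeat_threshold:
--         return False
--
--     for n in range(min_ngram, min(max_ngram + 1, len(chars) // repeat_threshold + 1)):
--         for i in range(len(chars) - n * repeat_threshold + 1):
--             ngram = tuple(chars[i : i + n])
--             consecutive_count = 1
--             pos = i + n
--             while pos + n <= len(chars):
--                 next_ngram = tuple(chars[pos : pos + n])
--                 if next_ngram == ngram:
--                     consecutive_count += 1
--                     pos += n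
--                 else:
--                     break
--
--             if consecutive_count >= repeat_threshold:
--                 return True
--
--     return False
-- ===== SOURCE B (Python) =====
-- def has_repetitive_ngrams(
--     text: str,
--     min_ngram: int,
--     max_ngram: int,
--     repeat_threshold: int,
-- ) -> bool:
--     """Shift-match formulation: an n-gram repeats >= t times consecutively iff
--     the boolean array match[j] = (text[j] == text[j+n]) contains a run of
--     n*(t-1) consecutive True values.  One linear scan per n."""
--     if not text:
--         return False
--
--     length = len(text)
--     if length < min_ngram * repeat_threshold:
--         return False
--
--     for n in range(min_ngram, min(max_ngram + 1, length // repeat_threshold + 1)):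
--         if n * repeat_threshold > length:
--             continue
--         need = n * (repeat_threshold - 1)
--         run = 0
--         best = 0
--         for j in range(length - n):
--             if text[j] == text[j + n]:
--                 run += 1
--                 best = max(best, run)
--             else:
--                 run = 0
--         if best >= need:
--             return True
--     return False
-- ===== Notes on version B (the rewrite author's own statement) =====
-- stated objective: faster
-- what changed: Instead of building tuple n-grams at every offset and counting consecutive equal tuples with a nested while-loop, B computes for each n the shift-match array match[j]=(text[j]==text[j+n]) in one linear scan and tests whether its longest True-run reaches n*(repeat_threshold-1).
-- outside the precondition, e.g. on has_repetitive_ngrams('ab', -1, 2, 1): A returns True, B raises IndexError; on has_repetitive_ngrams('ab', 1, 2, 0): A raises ZeroDivisionError, B raises ZeroDivisionError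
import Mathlib
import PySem

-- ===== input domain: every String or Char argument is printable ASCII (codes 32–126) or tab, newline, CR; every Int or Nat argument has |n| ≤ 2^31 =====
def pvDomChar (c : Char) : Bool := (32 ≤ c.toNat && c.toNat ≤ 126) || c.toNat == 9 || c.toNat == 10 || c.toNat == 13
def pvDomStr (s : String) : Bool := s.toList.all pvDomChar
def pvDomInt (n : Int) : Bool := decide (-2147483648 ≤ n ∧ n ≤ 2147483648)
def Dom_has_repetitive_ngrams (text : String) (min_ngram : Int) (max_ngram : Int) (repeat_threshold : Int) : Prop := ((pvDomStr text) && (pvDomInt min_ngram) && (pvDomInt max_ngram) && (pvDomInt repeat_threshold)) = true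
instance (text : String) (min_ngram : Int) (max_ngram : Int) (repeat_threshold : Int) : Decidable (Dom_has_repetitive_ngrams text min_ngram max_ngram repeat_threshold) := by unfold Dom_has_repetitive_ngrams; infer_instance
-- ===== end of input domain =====

-- B replaces A's tuple-building + consecutive-count inner loops by one linear shift-match
-- run scan per n (objective: faster).

-- ===== PORT A =====
-- the 'while pos + n <= len(chars)' counting loop of A; fuel bounds the iterations
-- (chars.length + 1 suffices for every n ≥ 1, the only n the loop reaches inside Pre_)
def pyCountReps (cs : List Char) (n : Int) (ngram : List Char) : Nat → Int → Int → Int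
  | 0, _, cnt => cnt
  | fuel+1, pos, cnt =>
    if pos + n ≤ (cs.length : Int) then
      if PySem.List.slice cs (some pos) (some (pos + n)) = ngram then
        pyCountReps cs n ngram fuel (pos + n) (cnt + 1)
      else cnt
    else cnt

def has_repetitive_ngrams (text : String) (min_ngram : Int) (max_ngram : Int) (repeat_threshold : Int) : Bool :=
  if text = "" then false
  else if ((text.toList.length : Int) < min_ngram * repeat_threshold) then false
  else (PySem.List.pyRange min_ngram
          (min (max_ngram + 1) (PySem.Int.floordiv (text.toList.length : Int) repeat_threshold + 1))).any fun n =>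
    (PySem.List.pyRange 0 ((text.toList.length : Int) - n * repeat_threshold + 1)).any fun i =>
      decide (repeat_threshold ≤
        pyCountReps text.toList n (PySem.List.slice text.toList (some i) (some (i + n)))
          (text.toList.length + 1) (i + n) 1)

-- ===== PORT B =====
def has_repetitive_ngrams_alt (text : String) (min_ngram : Int) (max_ngram : Int) (repeat_threshold : Int) : Bool :=
  if text = "" then false
  else if ((text.toList.length : Int) < min_ngram * repeat_threshold) then false
  else (PySem.List.pyRange min_ngram
          (min (max_ngram + 1) (PySem.Int.floordiv (text.toList.length : Int) repeat_threshold + 1))).any fun n =>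
    if ((text.toList.length : Int) < n * repeat_threshold) then false
    else decide (n * (repeat_threshold - 1) ≤
      ((PySem.List.pyRange 0 ((text.toList.length : Int) - n)).foldl
        (fun (p : Int × Int) j =>
          if PySem.List.pyGet? text.toList j = PySem.List.pyGet? text.toList (j + n) then
            (p.1 + 1, max p.2 (p.1 + 1))
          else (0, p.2)) (0, 0)).2)

-- ===== PRECONDITION & SPEC =====
-- Pre_ excludes (on non-empty text) repeat_threshold = 0, on which both programs raise
-- ZeroDivisionError, and non-positive min_ngram when the n-loop is non-empty (so some n ≤ 0
-- is reached) — there A diverges (n = 0) or returns accidental values of Python's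
-- negative-index slice wraparound while B raises IndexError.
def Pre_has_repetitive_ngrams (text : String) (min_ngram : Int) (max_ngram : Int) (repeat_threshold : Int) : Prop :=
  text = "" ∨ (repeat_threshold ≠ 0 ∧
    (1 ≤ min_ngram ∨
     min (max_ngram + 1) (PySem.Int.floordiv (text.toList.length : Int) repeat_threshold + 1) ≤ min_ngram))
instance (text : String) (min_ngram : Int) (max_ngram : Int) (repeat_threshold : Int) : Decidable (Pre_has_repetitive_ngrams text min_ngram max_ngram repeat_threshold) := by unfold Pre_has_repetitive_ngrams; infer_instance

def pvWitness_has_repetitive_ngrams : String × Int × Int × Int := ("abcabcabc", 3, 5, 3)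

def Spec_has_repetitive_ngrams (text : String) (min_ngram : Int) (max_ngram : Int) (repeat_threshold : Int) (out : Bool) : Prop := out = has_repetitive_ngrams_alt text min_ngram max_ngram repeat_threshold
instance (text : String) (min_ngram : Int) (max_ngram : Int) (repeat_threshold : Int) (out : Bool) : Decidable (Spec_has_repetitive_ngrams text min_ngram max_ngram repeat_threshold out) := by unfold Spec_has_repetitive_ngrams; infer_instance

-- ===== CLAIM (what is proved, stated in full; the proofs are below) =====
def Claim_equal_has_repetitive_ngrams : Prop := ∀ (text : String) (min_ngram : Int) (max_ngram : Int) (repeat_threshold : Int), Dom_has_repetitive_ngrams text min_ngram max_ngram repeat_threshold → Pre_has_repetitive_ngrams text min_ngram max_ngram repeat_threshold → Spec_has_repetitive_ngrams text min_ngram max_ngram repeat_threshold (has_repetitive_ngrams text min_ngram max_ngram repeat_threshold)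

-- ===== LEMMAS AND PROOFS =====

-- match array entry: does position j agree with position j+nn?
def matchB (cs : List Char) (nn : Nat) (j : Nat) : Bool := decide (cs[j]? = cs[j + nn]?)

-- length of the True-run of matchB ending just before q / best run within [0, q)
def trRun (M : Nat → Bool) : Nat → Nat
  | 0 => 0
  | q+1 => if M q then trRun M q + 1 else 0
def bstRun (M : Nat → Bool) : Nat → Nat
  | 0 => 0
  | q+1 => max (bstRun M q) (trRun M (q+1))

theorem countReps_ge (cs : List Char) (n : Int) (g : List Char) :
    ∀ (fuel : Nat) (pos cnt : Int), cnt ≤ pyCountReps cs n g fuel pos cnt := by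
  intro fuel
  induction fuel with
  | zero => intro pos cnt; simp [pyCountReps]
  | succ f ih =>
    intro pos cnt
    simp only [pyCountReps]
    split_ifs with h1 h2
    · exact le_trans (by omega) (ih (pos + n) (cnt + 1))
    · exact le_refl _
    · exact le_refl _

theorem countReps_iff (cs : List Char) (n : Int) (g : List Char) (k : Nat) :
    ∀ (fuel : Nat) (pos cnt : Int), k ≤ fuel →
    ((cnt + (k : Int) ≤ pyCountReps cs n g fuel pos cnt) ↔
     ∀ m : Nat, m < k → pos + (m : Int) * n + n ≤ (cs.length : Int) ∧
       PySem.List.slice cs (some (pos + (m : Int) * n)) (some (pos + (m : Int) * n + n)) = g) := by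
  induction k with
  | zero =>
    intro fuel pos cnt _
    simp only [Nat.cast_zero, add_zero]
    constructor
    · intro _ m hm; omega
    · intro _; exact countReps_ge cs n g fuel pos cnt
  | succ k' ih =>
    intro fuel pos cnt hfuel
    cases fuel with
    | zero => omega
    | succ f =>
      simp only [pyCountReps]
      split_ifs with h1 h2
      · rw [show cnt + ((k' + 1 : Nat) : Int) = (cnt + 1) + (k' : Int) by push_cast; ring,
            ih f (pos + n) (cnt + 1) (by omega)]
        constructor
        · intro H m hm
          cases m with
          | zero => simpa using ⟨h1, h2⟩
          | succ m' =>
            have := H m' (by omega)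
            constructor
            · have := this.1; push_cast; push_cast at this; linarith [this]
            · have h := this.2
              rw [show pos + ((m' + 1 : Nat) : Int) * n = pos + n + (m' : Int) * n by push_cast; ring]
              exact h
        · intro H m hm
          have := H (m + 1) (by omega)
          rw [show pos + ((m + 1 : Nat) : Int) * n = pos + n + (m : Int) * n by push_cast; ring] at this
          exact this
      · constructor
        · intro hc; exfalso
          have := countReps_ge cs n g 0 pos cnt
          simp [pyCountReps] at this
          omega
        · intro H; exfalso
          have := H 0 (by omega)
          simp at this
          exact h2 this.2
      · constructor
        · intro hc; exfalso; omega
        · intro H; exfalso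
          have := H 0 (by omega)
          simp at this
          exact h1 this.1

theorem take_drop_eq_iff (cs : List Char) (nn p q : Nat) :
    (List.take nn (List.drop p cs) = List.take nn (List.drop q cs)) ↔
    ∀ d : Nat, d < nn → cs[p + d]? = cs[q + d]? := by
  rw [List.ext_getElem?_iff]
  constructor
  · intro h d hd
    have := h d
    simpa [List.getElem?_take, List.getElem?_drop, hd] using this
  · intro h i
    simp only [List.getElem?_take, List.getElem?_drop]
    split_ifs with hi
    · exact h i hi
    · rfl

theorem chain_iff {α : Type} (f : Nat → α) (k : Nat) :
    (∀ m : Nat, m < k → f (m + 1) = f 0) ↔ (∀ m : Nat, m < k → f m = f (m + 1)) := by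
  constructor
  · intro h m hm
    cases m with
    | zero => exact (h 0 hm).symm
    | succ m' => exact (h m' (by omega)).trans (h (m' + 1) hm).symm
  · intro h m hm
    induction m with
    | zero => exact (h 0 hm).symm
    | succ m' ih => exact ((h (m' + 1) hm).symm).trans (ih (by omega))

theorem forall_blocks_iff (P : Nat → Prop) (nn k : Nat) (h : 0 < nn) :
    (∀ m : Nat, m < k → ∀ d : Nat, d < nn → P (m * nn + d)) ↔ ∀ j : Nat, j < k * nn → P j := by
  constructor
  · intro H j hj
    have hdiv : j / nn < k := Nat.div_lt_of_lt_mul (by rwa [Nat.mul_comm] at hj)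
    have hmod : j % nn < nn := Nat.mod_lt _ h
    have := H (j / nn) hdiv (j % nn) hmod
    rwa [Nat.mul_comm (j / nn) nn, Nat.div_add_mod j nn] at this
  · intro H m hm d hd
    apply H
    calc m * nn + d < m * nn + nn := by omega
      _ = (m + 1) * nn := by ring
      _ ≤ k * nn := Nat.mul_le_mul_right nn (by omega)

theorem foldl_runBest (cs : List Char) (nn : Nat) (m : Nat) :
    ((PySem.List.pyRange 0 (m : Int)).foldl
      (fun (p : Int × Int) j =>
        if PySem.List.pyGet? cs j = PySem.List.pyGet? cs (j + (nn : Int)) then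
          (p.1 + 1, max p.2 (p.1 + 1))
        else (0, p.2)) (0, 0))
    = ((trRun (matchB cs nn) m : Int), (bstRun (matchB cs nn) m : Int)) := by
  induction m with
  | zero => simp [trRun, bstRun]
  | succ m ih =>
    have hsplit : PySem.List.pyRange 0 ((m + 1 : Nat) : Int)
        = PySem.List.pyRange 0 (m : Int) ++ [(m : Int)] := by
      rw [show ((m + 1 : Nat) : Int) = (m : Int) + 1 by push_cast; ring]
      exact PySem.List.pyRange_one_succ_right (by positivity)
    rw [hsplit, List.foldl_append, ih]
    simp only [List.foldl_cons, List.foldl_nil]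
    rw [PySem.List.pyGet?_natCast,
        show (m : Int) + (nn : Int) = ((m + nn : Nat) : Int) by push_cast; ring,
        PySem.List.pyGet?_natCast]
    by_cases hM : cs[m]? = cs[m + nn]?
    · rw [if_pos hM]
      have hMB : matchB cs nn m = true := decide_eq_true hM
      simp only [trRun, bstRun, hMB, if_pos]
      simp [Nat.cast_max]
    · rw [if_neg hM]
      have hMB : matchB cs nn m = false := decide_eq_false hM
      simp only [trRun, bstRun, hMB]
      simp

theorem trRun_ge_iff (M : Nat → Bool) : ∀ (q r : Nat),
    (r ≤ trRun M q ↔ (r ≤ q ∧ ∀ j : Nat, q - r ≤ j → j < q → M j = true)) := by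
  intro q
  induction q with
  | zero =>
    intro r
    simp only [trRun]
    constructor
    · intro hr; exact ⟨hr, by omega⟩
    · intro ⟨hr, _⟩; exact hr
  | succ q' ih =>
    intro r
    simp only [trRun]
    by_cases hM : M q' = true
    · rw [if_pos hM]
      cases r with
      | zero =>
        constructor
        · intro _; exact ⟨by omega, by omega⟩
        · intro _; omega
      | succ r' =>
        rw [Nat.succ_le_succ_iff, ih r']
        constructor
        · intro ⟨h1, h2⟩
          refine ⟨by omega, fun j hj1 hj2 => ?_⟩
          by_cases hjq : j = q'
          · rwa [hjq]
          · exact h2 j (by omega) (by omega)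
        · intro ⟨h1, h2⟩
          exact ⟨by omega, fun j hj1 hj2 => h2 j (by omega) (by omega)⟩
    · rw [if_neg hM]
      constructor
      · intro hr; have : r = 0 := by omega
        subst this; exact ⟨by omega, by omega⟩
      · intro ⟨h1, h2⟩
        by_contra hc
        have hr1 : 1 ≤ r := by omega
        exact hM (h2 q' (by omega) (by omega))

theorem bstRun_ge_iff (M : Nat → Bool) : ∀ (m r : Nat),
    (r ≤ bstRun M m ↔ ∃ q : Nat, q ≤ m ∧ r ≤ trRun M q) := by
  intro m
  induction m with
  | zero =>
    intro r
    simp only [bstRun]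
    constructor
    · intro hr; exact ⟨0, le_refl _, by simpa [trRun] using hr⟩
    · intro ⟨q, hq, hr⟩
      have : q = 0 := by omega
      subst this; simpa [trRun] using hr
  | succ m' ih =>
    intro r
    simp only [bstRun]
    rw [le_max_iff]
    constructor
    · intro h
      cases h with
      | inl h => rcases (ih r).mp h with ⟨q, hq, hr⟩; exact ⟨q, by omega, hr⟩
      | inr h => exact ⟨m' + 1, le_refl _, h⟩
    · intro ⟨q, hq, hr⟩
      by_cases hqm : q ≤ m'
      · exact Or.inl ((ih r).mpr ⟨q, hqm, hr⟩)
      · have : q = m' + 1 := by omega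
        subst this; exact Or.inr hr

theorem window_iff (M : Nat → Bool) (m r : Nat) :
    (r ≤ bstRun M m ↔ ∃ i : Nat, i + r ≤ m ∧ ∀ j : Nat, i ≤ j → j < i + r → M j = true) := by
  rw [bstRun_ge_iff]
  constructor
  · intro ⟨q, hq, hr⟩
    rcases (trRun_ge_iff M q r).mp hr with ⟨hrq, hw⟩
    exact ⟨q - r, by omega, fun j hj1 hj2 => hw j (by omega) (by omega)⟩
  · intro ⟨i, hi, hw⟩
    refine ⟨i + r, hi, (trRun_ge_iff M (i + r) r).mpr ⟨by omega, fun j hj1 hj2 => hw j (by omega) hj2⟩⟩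

theorem floordiv_neg_upper (L t : Int) (hL : 1 ≤ L) (ht : t ≤ -1) :
    PySem.Int.floordiv L t ≤ -1 := by
  have hmod := PySem.Int.mod_neg_bounds L (show t < 0 by omega)
  have heq := PySem.Int.floordiv_mul_add_mod L t
  set q := PySem.Int.floordiv L t with hq
  by_contra hc
  push Not at hc
  have hq0 : 0 ≤ q := by omega
  nlinarith

-- A's "every later block equals the first block" condition at start iN is exactly a
-- window of nn*k consecutive shift-matches starting at iN
theorem blocks_iff_window (cs : List Char) (nn k iN : Nat) (hnn1 : 0 < nn)
    (hbound : iN + nn * (k + 1) ≤ cs.length) :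
    (∀ m : Nat, m < k →
        ((iN : Int) + (nn : Int)) + (m : Int) * (nn : Int) + (nn : Int) ≤ (cs.length : Int) ∧
        PySem.List.slice cs (some (((iN : Int) + (nn : Int)) + (m : Int) * (nn : Int)))
          (some (((iN : Int) + (nn : Int)) + (m : Int) * (nn : Int) + (nn : Int)))
          = PySem.List.slice cs (some (iN : Int)) (some ((iN : Int) + (nn : Int))))
    ↔ (∀ j : Nat, iN ≤ j → j < iN + nn * k → matchB cs nn j = true) := by
  have hg : PySem.List.slice cs (some (iN : Int)) (some ((iN : Int) + (nn : Int)))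
      = List.take nn (List.drop iN cs) := PySem.List.slice_natCast_add cs iN nn
  have hslice : ∀ m : Nat,
      PySem.List.slice cs (some (((iN : Int) + (nn : Int)) + (m : Int) * (nn : Int)))
        (some (((iN : Int) + (nn : Int)) + (m : Int) * (nn : Int) + (nn : Int)))
      = List.take nn (List.drop (iN + (m + 1) * nn) cs) := by
    intro m
    have e1 : ((iN : Int) + (nn : Int)) + (m : Int) * (nn : Int)
        = ((iN + (m + 1) * nn : Nat) : Int) := by push_cast; ring
    have e2 : ((iN : Int) + (nn : Int)) + (m : Int) * (nn : Int) + (nn : Int)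
        = ((iN + (m + 1) * nn : Nat) : Int) + ((nn : Nat) : Int) := by push_cast; ring
    rw [e1, PySem.List.slice_natCast_add]
  set f : Nat → List Char := fun m => List.take nn (List.drop (iN + m * nn) cs) with hf
  have hf0 : List.take nn (List.drop iN cs) = f 0 := by
    simp only [hf, Nat.zero_mul, Nat.add_zero]
  have step1 : (∀ m : Nat, m < k →
      ((iN : Int) + (nn : Int)) + (m : Int) * (nn : Int) + (nn : Int) ≤ (cs.length : Int) ∧
      PySem.List.slice cs (some (((iN : Int) + (nn : Int)) + (m : Int) * (nn : Int)))
        (some (((iN : Int) + (nn : Int)) + (m : Int) * (nn : Int) + (nn : Int)))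
        = PySem.List.slice cs (some (iN : Int)) (some ((iN : Int) + (nn : Int))))
      ↔ (∀ m : Nat, m < k → f (m + 1) = f 0) := by
    constructor
    · intro H m hm
      have := (H m hm).2
      rw [hslice m, hg, hf0] at this
      exact this
    · intro H m hm
      constructor
      · have hmul : (m + 2) * nn ≤ (k + 1) * nn := Nat.mul_le_mul_right nn (by omega)
        have h2 : iN + (m + 2) * nn ≤ cs.length := by
          have hcomm : nn * (k + 1) = (k + 1) * nn := Nat.mul_comm nn (k + 1)
          omega
        have h3 : ((iN : Int) + ((m : Int) + 2) * (nn : Int) ≤ (cs.length : Int)) := by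
          exact_mod_cast h2
        ring_nf at h3 ⊢
        linarith
      · rw [hslice m, hg, hf0]
        exact H m hm
  rw [step1, chain_iff f k]
  have step2 : (∀ m : Nat, m < k → f m = f (m + 1))
      ↔ (∀ m : Nat, m < k → ∀ d : Nat, d < nn →
          matchB cs nn (iN + (m * nn + d)) = true) := by
    constructor
    · intro H m hm d hd
      have := (take_drop_eq_iff cs nn (iN + m * nn) (iN + (m + 1) * nn)).mp (H m hm) d hd
      have e1 : iN + m * nn + d = iN + (m * nn + d) := by ring
      have e2 : iN + (m + 1) * nn + d = iN + (m * nn + d) + nn := by ring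
      rw [e1, e2] at this
      simp only [matchB, decide_eq_true_eq]
      exact this
    · intro H m hm
      apply (take_drop_eq_iff cs nn (iN + m * nn) (iN + (m + 1) * nn)).mpr
      intro d hd
      have := H m hm d hd
      simp only [matchB, decide_eq_true_eq] at this
      have e1 : iN + m * nn + d = iN + (m * nn + d) := by ring
      have e2 : iN + (m + 1) * nn + d = iN + (m * nn + d) + nn := by ring
      rw [e1, e2]
      exact this
  rw [step2, forall_blocks_iff (fun jr => matchB cs nn (iN + jr) = true) nn k hnn1]
  have hkc : k * nn = nn * k := Nat.mul_comm k nn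
  constructor
  · intro H j hj1 hj2
    have := H (j - iN) (by omega)
    rwa [show iN + (j - iN) = j by omega] at this
  · intro H jr hjr
    exact H (iN + jr) (by omega) (by omega)

-- the per-n core: A's scan-and-count inner loops equal B's run test
theorem inner_eq (cs : List Char) (n t : Int) (hn : 1 ≤ n) (ht : 1 ≤ t)
    (hnt : n * t ≤ (cs.length : Int)) :
    ((PySem.List.pyRange 0 ((cs.length : Int) - n * t + 1)).any fun i =>
       decide (t ≤ pyCountReps cs n (PySem.List.slice cs (some i) (some (i + n)))
         (cs.length + 1) (i + n) 1))
    = (if ((cs.length : Int) < n * t) then false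
       else decide (n * (t - 1) ≤
         ((PySem.List.pyRange 0 ((cs.length : Int) - n)).foldl
           (fun (p : Int × Int) j =>
             if PySem.List.pyGet? cs j = PySem.List.pyGet? cs (j + n) then
               (p.1 + 1, max p.2 (p.1 + 1))
             else (0, p.2)) (0, 0)).2)) := by
  rw [if_neg (not_lt.mpr hnt)]
  obtain ⟨nn, hnn⟩ : ∃ nn : Nat, (nn : Int) = n := ⟨n.toNat, Int.toNat_of_nonneg (by omega)⟩
  obtain ⟨tt, htt⟩ : ∃ tt : Nat, (tt : Int) = t := ⟨t.toNat, Int.toNat_of_nonneg (by omega)⟩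
  obtain ⟨k, rfl⟩ : ∃ k : Nat, tt = k + 1 := ⟨tt - 1, by omega⟩
  have hnn1 : 1 ≤ nn := by omega
  have hLnat : nn * (k + 1) ≤ cs.length := by
    have h := hnt
    rw [← hnn, ← htt] at h
    have h2 : ((nn * (k + 1) : Nat) : Int) ≤ (cs.length : Int) := by push_cast; push_cast at h; linarith
    exact_mod_cast h2
  have hnnL : nn ≤ cs.length := le_trans (Nat.le_mul_of_pos_right nn (by omega)) hLnat
  rw [← hnn, ← htt]
  rw [show (cs.length : Int) - (nn : Int) = ((cs.length - nn : Nat) : Int) by omega]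
  rw [foldl_runBest cs nn (cs.length - nn)]
  apply Bool.eq_iff_iff.mpr
  rw [List.any_eq_true]
  simp only [decide_eq_true_eq]
  have hmulcast : ((nn * (k + 1) : Nat) : Int) = (nn : Int) * ((k + 1 : Nat) : Int) := by push_cast; ring
  have hmulsplit : nn * (k + 1) = nn * k + nn := by ring
  have hRHS : ((nn : Int) * (((k + 1 : Nat) : Int) - 1) ≤ ((bstRun (matchB cs nn) (cs.length - nn) : Nat) : Int))
      ↔ (nn * k ≤ bstRun (matchB cs nn) (cs.length - nn)) := by
    rw [show (nn : Int) * (((k + 1 : Nat) : Int) - 1) = ((nn * k : Nat) : Int) by push_cast; ring]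
    exact Nat.cast_le
  rw [hRHS, window_iff]
  have hk_le : k ≤ cs.length + 1 := by
    have := Nat.le_mul_of_pos_left (k + 1) (show 0 < nn by omega)
    omega
  constructor
  · rintro ⟨i, hi, hcount⟩
    rcases PySem.List.mem_pyRange_one.mp hi with ⟨h0i, hilt⟩
    obtain ⟨iN, rfl⟩ : ∃ iN : Nat, (iN : Int) = i := ⟨i.toNat, Int.toNat_of_nonneg h0i⟩
    have hbound : iN + nn * (k + 1) ≤ cs.length := by omega
    rw [show ((k + 1 : Nat) : Int) = 1 + (k : Int) by push_cast; ring] at hcount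
    rw [countReps_iff cs (nn : Int) _ k (cs.length + 1) ((iN : Int) + (nn : Int)) 1 hk_le] at hcount
    exact ⟨iN, by omega, (blocks_iff_window cs nn k iN (by omega) hbound).mp hcount⟩
  · rintro ⟨iN, hiN, hwin⟩
    have hbound : iN + nn * (k + 1) ≤ cs.length := by omega
    refine ⟨(iN : Int), PySem.List.mem_pyRange_one.mpr ⟨by positivity, by omega⟩, ?_⟩
    rw [show ((k + 1 : Nat) : Int) = 1 + (k : Int) by push_cast; ring]
    rw [countReps_iff cs (nn : Int) _ k (cs.length + 1) ((iN : Int) + (nn : Int)) 1 hk_le]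
    exact (blocks_iff_window cs nn k iN (by omega) hbound).mpr hwin

-- ===== VERDICT (by name: the statement is the Claim_ definition above) =====
theorem has_repetitive_ngrams_spec : Claim_equal_has_repetitive_ngrams := by
  intro text mn mx t _hdom hpre
  unfold Spec_has_repetitive_ngrams has_repetitive_ngrams has_repetitive_ngrams_alt
  by_cases htext : text = ""
  · simp [htext]
  · rw [if_neg htext, if_neg htext]
    rcases hpre with h | ⟨ht0, hmn⟩
    · exact absurd h htext
    by_cases hlen : ((text.toList.length : Int) < mn * t)
    · rw [if_pos hlen, if_pos hlen]
    rw [if_neg hlen, if_neg hlen]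
    have hL1 : 1 ≤ (text.toList.length : Int) := by
      have : text.toList ≠ [] := fun h => htext (String.toList_eq_nil_iff.mp h)
      have : 0 < text.toList.length := List.length_pos_iff.mpr this
      exact_mod_cast this
    apply PySem.List.any_congr_mem
    intro n hn
    rcases PySem.List.mem_pyRange_one.mp hn with ⟨hmnn, hnlt⟩
    have hn1 : 1 ≤ n := by rcases hmn with h1 | h2 <;> omega
    have hnfd : n ≤ PySem.Int.floordiv (text.toList.length : Int) t := by
      have := lt_min_iff.mp hnlt
      omega
    rcases lt_or_ge 0 t with htpos | htnonpos
    · have ht1 : 1 ≤ t := htpos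
      have hnt : n * t ≤ (text.toList.length : Int) :=
        (PySem.Int.le_floordiv_iff_mul_le htpos).mp hnfd
      exact inner_eq text.toList n t hn1 ht1 hnt
    · have ht1 : t ≤ -1 := by omega
      have := floordiv_neg_upper (text.toList.length : Int) t hL1 ht1
      omega
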